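-- pv_equiv track=rewrite | github.com/yonghuili-ai/DataStructure | stack/leetcode739_DailyTemperatures.py | previousCoolerTemp
-- ===== SOURCE A (Python) =====
-- def previousCoolerTemp(temperatures):
--     n = len(temperatures)
--     i = 0
--     stack = []
--     res = [0 for _ in range(n)]
--     while i < n:
--         while stack and stack[-1][0] >= temperatures[i]: # previous is larger, needs to pop
--             stack.pop()
--         if stack and stack[-1][0] < temperatures[i]: # previous cooler exists
--             res[i] = i - stack[-1][1]
--         elif not stack:
--             pass
--         stack.append((temperatures[i], i))
--         i += 1
--     return res
-- ===== SOURCE B (Python) =====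
-- def previousCoolerTemp(temperatures):
--     res = []
--     for i in range(len(temperatures)):
--         d = 0
--         for j in range(i - 1, -1, -1):
--             if temperatures[j] < temperatures[i]:
--                 d = i - j
--                 break
--         res.append(d)
--     return res
-- ===== Notes on version B (the rewrite author's own statement) =====
-- stated objective: simpler
-- what changed: Replaces the monotonic stack and in-place result array with a direct nested backward scan that finds the nearest previous strictly cooler index for each position independently.
import Mathlib
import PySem

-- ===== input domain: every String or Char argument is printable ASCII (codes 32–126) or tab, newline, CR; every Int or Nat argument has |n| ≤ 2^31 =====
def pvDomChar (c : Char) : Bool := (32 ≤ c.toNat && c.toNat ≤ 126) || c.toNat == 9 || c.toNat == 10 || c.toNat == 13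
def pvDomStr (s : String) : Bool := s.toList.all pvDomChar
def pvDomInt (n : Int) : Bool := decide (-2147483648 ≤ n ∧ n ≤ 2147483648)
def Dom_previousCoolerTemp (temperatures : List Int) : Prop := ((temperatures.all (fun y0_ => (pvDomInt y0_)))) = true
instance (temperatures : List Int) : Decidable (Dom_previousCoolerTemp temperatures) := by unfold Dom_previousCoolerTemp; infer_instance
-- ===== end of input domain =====

-- B replaces A's monotonic stack with a per-index backward scan (simpler, no shared state).

-- ===== PORT A =====
-- inner `while stack and stack[-1][0] >= temperatures[i]: stack.pop()` (stack head = top)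
def pcPop (ti : Int) : List (Int × Nat) → List (Int × Nat)
  | [] => []
  | p :: rest => if p.1 ≥ ti then pcPop ti rest else p :: rest

-- outer `while i < n` loop: state (i, stack, res)
def pcLoop (ts : List Int) (n : Nat) (i : Nat) (stack : List (Int × Nat)) (res : List Int) : List Int :=
  if _h : i < n then
    let ti := ts.getD i 0
    let stack' := pcPop ti stack
    let res' := match stack' with
      | p :: _ => if p.1 < ti then res.set i ((i : Int) - (p.2 : Int)) else res
      | [] => res
    pcLoop ts n (i + 1) ((ti, i) :: stack') res'
  else res
termination_by n - i

def previousCoolerTemp (temperatures : List Int) : List Int :=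
  pcLoop temperatures temperatures.length 0 [] (List.replicate temperatures.length 0)

-- ===== PORT B =====
-- inner `for j in range(i-1, -1, -1): if temperatures[j] < t: d = i - j; break` (argument = j+1, counts down)
def pcInner (ts : List Int) (t : Int) (i : Nat) : Nat → Int
  | 0 => 0
  | j + 1 => if ts.getD j 0 < t then (i : Int) - (j : Int) else pcInner ts t i j

def previousCoolerTemp_alt (temperatures : List Int) : List Int :=
  (List.range temperatures.length).map
    (fun i => pcInner temperatures (temperatures.getD i 0) i i)

-- ===== PRECONDITION & SPEC =====
def Spec_previousCoolerTemp (temperatures : List Int) (out : List Int) : Prop := out = previousCoolerTemp_alt temperatures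
instance (temperatures : List Int) (out : List Int) : Decidable (Spec_previousCoolerTemp temperatures out) := by unfold Spec_previousCoolerTemp; infer_instance

-- ===== CLAIM (what is proved, stated in full; the proofs are below) =====
def Claim_equal_previousCoolerTemp : Prop := ∀ (temperatures : List Int), Dom_previousCoolerTemp temperatures → Spec_previousCoolerTemp temperatures (previousCoolerTemp temperatures)

-- ===== LEMMAS AND PROOFS =====

-- nearest previous index j < k with ts[j] < v (B's inner scan, as an Option)
def pcNb (ts : List Int) (v : Int) : Nat → Option Nat
  | 0 => none
  | j + 1 => if ts.getD j 0 < v then some j else pcNb ts v j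

-- the stack A holds after processing the prefix of length i
def pcChain (ts : List Int) : Nat → List (Int × Nat)
  | 0 => []
  | i + 1 => (ts.getD i 0, i) :: pcPop (ts.getD i 0) (pcChain ts i)

theorem pcInner_eq_nb (ts : List Int) (t : Int) (i j : Nat) :
    pcInner ts t i j = match pcNb ts t j with
      | some k => (i : Int) - (k : Int)
      | none => 0 := by
  induction j with
  | zero => simp [pcInner, pcNb]
  | succ j ih =>
    simp only [pcInner, pcNb]
    split_ifs with h <;> simp [ih]

theorem pcPop_pcPop (v w : Int) (h : v ≤ w) (l : List (Int × Nat)) :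
    pcPop v (pcPop w l) = pcPop v l := by
  induction l with
  | nil => rfl
  | cons p rest ih =>
    by_cases hw : p.1 ≥ w
    · have hv : p.1 ≥ v := le_trans h hw
      simp [pcPop, hw, hv, ih]
    · simp [pcPop, hw]

theorem pcNb_some_lt (ts : List Int) (v : Int) (k j : Nat)
    (h : pcNb ts v k = some j) : ts.getD j 0 < v := by
  induction k with
  | zero => simp [pcNb] at h
  | succ k ih =>
    simp only [pcNb] at h
    split_ifs at h with hk
    · cases h; exact hk
    · exact ih h

theorem pcPop_cons (v : Int) (p : Int × Nat) (rest : List (Int × Nat)) :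
    pcPop v (p :: rest) = if p.1 ≥ v then pcPop v rest else p :: rest := rfl

theorem pcChain_head (ts : List Int) (i : Nat) (v : Int) :
    (pcPop v (pcChain ts i)).head? = (pcNb ts v i).map (fun j => (ts.getD j 0, j)) := by
  induction i with
  | zero => simp [pcChain, pcPop, pcNb]
  | succ i ih =>
    simp only [pcChain, pcNb]
    by_cases hlt : ts.getD i 0 < v
    · rw [pcPop_cons, if_neg (not_le.mpr hlt), if_pos hlt]
      rfl
    · have hge : ts.getD i 0 ≥ v := not_lt.mp hlt
      rw [pcPop_cons, if_pos hge, pcPop_pcPop v _ hge, if_neg hlt]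
      exact ih

theorem pcSet_mid (r0 : List Int) (i k : Nat) (v : Int) (h : r0.length = i) :
    (r0 ++ (0 : Int) :: List.replicate k 0).set i v
      = (r0 ++ [v]) ++ List.replicate k 0 := by
  subst h
  rw [List.set_append_right _ _ (le_refl _)]
  simp

theorem pcLoop_eq (ts : List Int) :
    ∀ (k i : Nat) (r0 : List Int), r0.length = i → i + k = ts.length →
      pcLoop ts ts.length i (pcChain ts i) (r0 ++ List.replicate k 0)
        = r0 ++ (List.range' i k).map (fun j => pcInner ts (ts.getD j 0) j j) := by
  intro k
  induction k with
  | zero =>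
    intro i r0 hr hik
    have : ¬ i < ts.length := by omega
    rw [pcLoop]
    simp [this]
  | succ k ih =>
    intro i r0 hr hik
    have hi : i < ts.length := by omega
    rw [pcLoop]
    simp only [hi, dif_pos]
    set ti := ts.getD i 0 with hti
    have hhead := pcChain_head ts i ti
    have hchain : (ti, i) :: pcPop ti (pcChain ts i) = pcChain ts (i + 1) := rfl
    have hval : pcInner ts ti i i = match pcNb ts ti i with
      | some j => (i : Int) - (j : Int)
      | none => 0 := pcInner_eq_nb ts ti i i
    have hrange : List.range' i (k + 1) = i :: List.range' (i + 1) k := by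
      simp [List.range'_succ]
    have hrepl : (List.replicate (k + 1) (0 : Int)) = (0 : Int) :: List.replicate k 0 := rfl
    cases hnb : pcNb ts ti i with
    | none =>
      have hnil : pcPop ti (pcChain ts i) = [] := by
        have := hhead; rw [hnb] at this; simpa using this
      have hc1 : pcChain ts (i + 1) = [(ti, i)] := by
        rw [pcChain, ← hti, hnil]
      rw [hnil]
      have hres : pcInner ts ti i i = 0 := by rw [hval, hnb]
      have hih := ih (i + 1) (r0 ++ [0]) (by simp [hr]) (by omega)
      rw [hc1] at hih
      rw [hrepl]
      have hsplit : r0 ++ (0 : Int) :: List.replicate k 0 = (r0 ++ [0]) ++ List.replicate k 0 := by simp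
      rw [hsplit, hih, hrange]
      simp
      exact hres.symm
    | some j =>
      have hlt : ts.getD j 0 < ti := pcNb_some_lt ts ti i j hnb
      obtain ⟨tl, htl⟩ : ∃ tl, pcPop ti (pcChain ts i) = (ts.getD j 0, j) :: tl := by
        have := hhead; rw [hnb] at this
        cases hc : pcPop ti (pcChain ts i) with
        | nil => rw [hc] at this; simp at this
        | cons p tl =>
          rw [hc] at this; simp at this
          exact ⟨tl, by rw [this]; simp [List.getD]⟩
      have hc1 : pcChain ts (i + 1) = (ti, i) :: (ts.getD j 0, j) :: tl := by
        rw [pcChain, ← hti, htl]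
      rw [htl]
      simp only [hlt, if_pos]
      have hres : pcInner ts ti i i = (i : Int) - (j : Int) := by rw [hval, hnb]
      rw [hrepl, pcSet_mid r0 i k _ hr]
      have hih := ih (i + 1) (r0 ++ [(i : Int) - (j : Int)]) (by simp [hr]) (by omega)
      rw [hc1] at hih
      rw [hih, hrange]
      simp
      exact hres.symm

-- ===== VERDICT (by name: the statement is the Claim_ definition above) =====
theorem previousCoolerTemp_spec : Claim_equal_previousCoolerTemp := by
  intro ts _
  unfold Spec_previousCoolerTemp previousCoolerTemp previousCoolerTemp_alt
  have := pcLoop_eq ts ts.length 0 [] rfl (by omega)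
  simpa [pcChain, List.range_eq_range'] using this
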